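-- pv_equiv track=rewrite | github.com/mersoit/IssueMiner | phase4b_populate_variants.py | _ensure_single_slashes
-- ===== SOURCE A (Python) =====
-- def _ensure_single_slashes(path: str) -> str:
--     p = (path or "").strip().replace("\\", "/")
--     while "//" in p:
--         p = p.replace("//", "/")
--     if not p.startswith("/"):
--         p = "/" + p
--     if p != "/" and p.endswith("/"):
--         p = p[:-1]
--     return p
-- ===== SOURCE B (Python) =====
-- def _ensure_single_slashes(path: str) -> str:
--     p = (path or "").strip().replace("\\", "/")
--     return "/" + "/".join(seg for seg in p.split("/") if seg)
-- ===== Notes on version B (the rewrite author's own statement) =====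
-- stated objective: idiomatic
-- what changed: Replaced A's fixed-point while-loop that repeatedly collapses doubled separators, plus its separate leading-slash guard and trailing-slash strip, by a single tokenize-and-rejoin pass: split the path on the separator, keep non-empty segments, join them and prepend the separator.
import Mathlib
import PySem

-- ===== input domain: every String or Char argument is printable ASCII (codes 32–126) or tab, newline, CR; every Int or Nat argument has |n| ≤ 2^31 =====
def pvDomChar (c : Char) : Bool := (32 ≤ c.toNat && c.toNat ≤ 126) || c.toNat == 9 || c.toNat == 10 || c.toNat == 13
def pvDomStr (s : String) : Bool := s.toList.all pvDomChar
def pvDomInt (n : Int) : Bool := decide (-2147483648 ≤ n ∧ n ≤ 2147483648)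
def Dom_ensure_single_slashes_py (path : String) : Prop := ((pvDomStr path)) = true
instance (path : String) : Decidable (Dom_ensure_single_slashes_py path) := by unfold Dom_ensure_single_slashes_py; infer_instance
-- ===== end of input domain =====

-- B replaces A's repeated replace("//","/") loop and slash fix-ups by one split/filter/join pass (idiomatic; same return value, proved below).

-- ===== PORT A =====
-- A-side helpers: myRep is one pass of p.replace("//","/") as a structural recursion;
-- replace_len_lt is the termination measure for A's while-loop (cited in decreasing_by).
def myRep : List Char → List Char
  | '/' :: '/' :: t => '/' :: myRep t
  | c :: t => c :: myRep t
  | [] => []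

lemma myRep_cons (c : Char) (t : List Char) (h : ¬ (c = '/' ∧ t.head? = some '/')) :
    myRep (c :: t) = c :: myRep t := by
  cases t with
  | nil => cases c <;> simp [myRep]
  | cons d t' =>
      by_cases hc : c = '/' <;> by_cases hd : d = '/' <;> simp_all [myRep]

lemma myRep_len_le (l : List Char) : (myRep l).length ≤ l.length := by
  fun_induction myRep <;> simp_all; omega

lemma myRep_len_lt (l : List Char) (h : ['/','/'] <:+: l) : (myRep l).length < l.length := by
  fun_induction myRep with
  | case1 t ih => have := myRep_len_le t; simp; omega
  | case2 c t hne ih =>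
      simp only [List.infix_cons_iff] at h
      rcases h with h | h
      · obtain ⟨r, hr⟩ := h
        cases t with
        | nil => simp at hr
        | cons d t' => simp at hr; exact (hne t' hr.1.symm (by rw [← hr.2.1])).elim
      · have := ih h; simp; omega
  | case3 => simp at h

lemma rep_go (fuel : Nat) (l acc : List Char) (h : l.length ≤ fuel) :
    PySem.Chars.replace.go ['/','/'] ['/'] fuel l acc = acc.reverse ++ myRep l := by
  induction fuel generalizing l acc with
  | zero =>
      have hl : l = [] := List.eq_nil_of_length_eq_zero (by omega)
      subst hl; simp [PySem.Chars.replace.go, myRep]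
  | succ n ih =>
    cases l with
    | nil => simp [PySem.Chars.replace.go, myRep]
    | cons c t =>
      rw [PySem.Chars.replace.go]
      by_cases hp : (['/','/'] : List Char).isPrefixOf (c :: t)
      · obtain ⟨r, hr⟩ := List.isPrefixOf_iff_prefix.mp hp
        simp only [hp, if_true]
        have hc : c = '/' := by simp at hr; exact hr.1.symm
        have hEq : ('/' : Char) :: '/' :: r = c :: t := hr
        injection hEq with h1 h2
        subst h1; subst h2
        rw [show List.drop (['/','/'] : List Char).length ('/' :: '/' :: r) = r from rfl,
            show (['/'] : List Char).reverse = ['/'] from rfl, List.singleton_append]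
        rw [ih r ('/' :: acc) (by simp at h ⊢; omega)]
        simp [myRep]
      · rw [if_neg (by simp [hp])]
        rw [ih t (c :: acc) (by simp at h ⊢; omega)]
        have : ¬ (c = '/' ∧ t.head? = some '/') := by
          rintro ⟨rfl, hh⟩
          cases t with
          | nil => simp at hh
          | cons d t' => simp at hh; subst hh; simp [List.isPrefixOf] at hp
        rw [myRep_cons c t this]; simp

lemma replace_eq_myRep (l : List Char) :
    PySem.Chars.replace l ['/','/'] ['/'] = myRep l := by
  rw [PySem.Chars.replace]
  simp [rep_go l.length l [] le_rfl]

lemma replace_len_lt (p : List Char) (h : PySem.Chars.isIn ['/','/'] p = true) :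
    (PySem.Chars.replace p ['/','/'] ['/']).length < p.length := by
  rw [replace_eq_myRep]
  exact myRep_len_lt p ((PySem.Chars.isIn_iff_infix _ _).mp h)

def ensure_loop (p : List Char) : List Char :=
  if h : PySem.Chars.isIn ['/','/'] p then
    ensure_loop (PySem.Chars.replace p ['/','/'] ['/'])
  else p
termination_by p.length
decreasing_by exact replace_len_lt p h

-- Port of A: p = (path or "").strip().replace("\\","/"); while "//" in p: p = p.replace("//","/");
-- then the leading-slash guard and the trailing-slash strip (p[:-1] via PySem slice).
def ensure_single_slashes_py (path : String) : String :=
  let p0 := PySem.Chars.replace (PySem.Chars.strip path.toList) ['\\'] ['/']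
  let p1 := ensure_loop p0
  let p2 := if !(PySem.Chars.startswith p1 ['/']) then '/' :: p1 else p1
  let p3 := if p2 ≠ ['/'] ∧ PySem.Chars.endswith p2 ['/']
            then PySem.List.slice p2 none (some (-1)) else p2
  String.ofList p3

-- ===== PORT B =====
-- Port of B: "/" + "/".join(seg for seg in p.split("/") if seg)
def ensure_single_slashes_py_alt (path : String) : String :=
  let p := PySem.Chars.replace (PySem.Chars.strip path.toList) ['\\'] ['/']
  String.ofList ('/' :: PySem.Chars.join ['/']
    ((PySem.Chars.splitOn p ['/']).filter (fun s => !s.isEmpty)))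

-- ===== PRECONDITION & SPEC =====
def Spec_ensure_single_slashes_py (path : String) (out : String) : Prop := out = ensure_single_slashes_py_alt path
instance (path : String) (out : String) : Decidable (Spec_ensure_single_slashes_py path out) := by unfold Spec_ensure_single_slashes_py; infer_instance

-- ===== CLAIM (what is proved, stated in full; the proofs are below) =====
def Claim_equal_ensure_single_slashes_py : Prop := ∀ (path : String), Dom_ensure_single_slashes_py path → Spec_ensure_single_slashes_py path (ensure_single_slashes_py path)

-- ===== LEMMAS AND PROOFS =====
def mySplit : List Char → List (List Char)
  | [] => [[]]
  | c :: t => if c = '/' then [] :: mySplit t else (mySplit t).modifyHead (c :: ·)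

lemma mySplit_ne_nil (l : List Char) : mySplit l ≠ [] := by
  cases l with
  | nil => simp [mySplit]
  | cons c t =>
      simp only [mySplit]
      split
      · simp
      · cases h : mySplit t with
        | nil => exact absurd h (mySplit_ne_nil t)
        | cons p ps => simp [List.modifyHead]

lemma split_go (fuel : Nat) (l cur : List Char) (acc : List (List Char)) (h : l.length ≤ fuel) :
    PySem.Chars.splitOn.go ['/'] fuel l cur acc
      = acc.reverse ++ (mySplit l).modifyHead (cur.reverse ++ ·) := by
  induction fuel generalizing l cur acc with
  | zero =>
      have hl : l = [] := List.eq_nil_of_length_eq_zero (by omega)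
      subst hl; simp [PySem.Chars.splitOn.go, mySplit]
  | succ n ih =>
    cases l with
    | nil => simp [PySem.Chars.splitOn.go, mySplit]
    | cons c t =>
      rw [PySem.Chars.splitOn.go]
      by_cases hc : c = '/'
      · subst hc
        rw [if_pos (by simp [List.isPrefixOf])]
        rw [show List.drop (['/'] : List Char).length ('/' :: t) = t from rfl]
        rw [ih t [] (cur.reverse :: acc) (by simp at h ⊢; omega)]
        have hm : (mySplit t).modifyHead (([] : List Char).reverse ++ ·) = mySplit t := by
          cases hmt : mySplit t with
          | nil => rfl
          | cons p ps => simp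
        rw [hm]
        simp [mySplit]
      · rw [if_neg (by simp [List.isPrefixOf]; exact fun h' => hc h'.symm)]
        rw [ih t (c :: cur) acc (by simp at h ⊢; omega)]
        simp only [mySplit, if_neg hc]
        cases hmt : mySplit t with
        | nil => exact absurd hmt (mySplit_ne_nil t)
        | cons p ps => simp

lemma splitOn_eq_mySplit (l : List Char) :
    PySem.Chars.splitOn l ['/'] = mySplit l := by
  rw [PySem.Chars.splitOn, split_go (l.length + 1) l [] [] (by omega)]
  cases hmt : mySplit l with
  | nil => exact absurd hmt (mySplit_ne_nil l)
  | cons p ps => simp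

lemma mySplit_slash_free (l : List Char) : ∀ s ∈ mySplit l, '/' ∉ s := by
  induction l with
  | nil => simp [mySplit]
  | cons c t ih =>
      intro s hs
      simp only [mySplit] at hs
      split at hs
      · rcases List.mem_cons.mp hs with rfl | hs'
        · simp
        · exact ih s hs'
      · cases hmt : mySplit t with
        | nil => exact absurd hmt (mySplit_ne_nil t)
        | cons p ps =>
            rw [hmt] at hs; simp only [List.modifyHead] at hs
            rcases List.mem_cons.mp hs with rfl | hs'
            · intro hmem
              rcases List.mem_cons.mp hmem with rfl | hmem'
              · simp_all
              · exact ih p (by rw [hmt]; exact List.mem_cons_self ..) hmem'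
            · exact ih s (by rw [hmt]; exact List.mem_cons_of_mem _ hs')

def dedup : List Char → List Char
  | '/' :: '/' :: t => dedup ('/' :: t)
  | c :: t => c :: dedup t
  | [] => []

lemma dedup_cons_ne (c : Char) (t : List Char) (hc : c ≠ '/') :
    dedup (c :: t) = c :: dedup t := by
  cases t with
  | nil => cases c <;> simp [dedup]
  | cons d t' => by_cases hd : d = '/' <;> simp_all [dedup]

lemma dedup_slash_cons (x : List Char) :
    dedup ('/' :: x) = if x.head? = some '/' then dedup x else '/' :: dedup x := by
  cases x with
  | nil => simp [dedup]
  | cons d t => by_cases hd : d = '/' <;> simp_all [dedup]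

lemma head?_myRep (l : List Char) : (myRep l).head? = l.head? := by
  fun_induction myRep <;> simp

lemma dedup_myRep (l : List Char) : dedup (myRep l) = dedup l := by
  fun_induction myRep with
  | case1 t ih =>
      rw [show dedup ('/' :: '/' :: t) = dedup ('/' :: t) from rfl]
      rw [dedup_slash_cons (myRep t), dedup_slash_cons t, head?_myRep, ih]
  | case2 c t hne ih =>
      by_cases hc : c = '/'
      · subst hc
        rw [dedup_slash_cons (myRep t), dedup_slash_cons t, head?_myRep, ih]
      · rw [dedup_cons_ne c _ hc, dedup_cons_ne c _ hc, ih]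
  | case3 => rfl

lemma dedup_eq_self (l : List Char) (h : ¬ ['/','/'] <:+: l) : dedup l = l := by
  induction l with
  | nil => rfl
  | cons c t ih =>
      have ht : ¬ ['/','/'] <:+: t := fun h' => h (List.infix_cons h')
      by_cases hc : c = '/'
      · subst hc
        rw [dedup_slash_cons, ih ht]
        cases t with
        | nil => simp
        | cons d t' =>
            have hd : d ≠ '/' := by
              rintro rfl
              exact h ⟨[], t', rfl⟩
            simp [hd]
      · rw [dedup_cons_ne c t hc, ih ht]

def segs (l : List Char) : List (List Char) := (mySplit l).filter (fun s => !s.isEmpty)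

lemma intercalate_singleton (s x : List Char) : List.intercalate s [x] = x := by
  simp [List.intercalate]

lemma intercalate_cons_cons (s x y : List Char) (r : List (List Char)) :
    List.intercalate s (x :: y :: r) = x ++ s ++ List.intercalate s (y :: r) := by
  simp [List.intercalate, List.intersperse]

lemma singleton_suffix_iff (a : Char) (l : List Char) : [a] <:+ l ↔ l.getLast? = some a := by
  constructor
  · rintro ⟨p, rfl⟩; exact List.getLast?_concat ..
  · intro h
    have hl : l ≠ [] := by rintro rfl; simp at h
    refine ⟨l.dropLast, ?_⟩
    have := List.getLast?_eq_some_getLast hl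
    rw [h] at this
    injection this with hv
    rw [hv]
    exact List.dropLast_append_getLast hl

lemma all_slash_of_segs_nil (l : List Char) (h : segs l = []) : ∀ x ∈ l, x = '/' := by
  induction l with
  | nil => simp
  | cons c t ih =>
      by_cases hc : c = '/'
      · subst hc
        have : segs t = [] := by simpa [segs, mySplit] using h
        intro x hx
        rcases List.mem_cons.mp hx with rfl | hx'
        · rfl
        · exact ih this x hx'
      · exfalso
        cases hmt : mySplit t with
        | nil => exact absurd hmt (mySplit_ne_nil t)
        | cons p ps =>
            simp [segs, mySplit, hc, hmt] at h

lemma intercalate_cons_head (s : List Char) (a : Char) (x : List Char) (r : List (List Char)) :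
    List.intercalate s ((a :: x) :: r) = a :: List.intercalate s (x :: r) := by
  cases r with
  | nil => simp [intercalate_singleton]
  | cons y r' => rw [intercalate_cons_cons, intercalate_cons_cons]; simp

lemma getLast?_all_slash (l : List Char) (h : ∀ x ∈ l, x = '/') (hl : l ≠ []) :
    l.getLast? = some '/' := by
  rw [List.getLast?_eq_some_getLast hl]
  exact congrArg some (h _ (List.getLast_mem hl))

lemma reconstruct (l : List Char) :
    dedup l = (if l.head? = some '/' then ['/'] else [])
      ++ List.intercalate ['/'] (segs l)
      ++ (if l.getLast? = some '/' ∧ segs l ≠ [] then ['/'] else []) := by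
  induction l with
  | nil => simp [dedup, segs, mySplit, List.intercalate]
  | cons c t ih =>
    by_cases hc : c = '/'
    · subst hc
      cases t with
      | nil => simp [dedup, segs, mySplit, List.intercalate]
      | cons d t' =>
        by_cases hd : d = '/'
        · subst hd
          rw [dedup_slash_cons, if_pos (by simp)]
          rw [ih]
          have hsegs : segs ('/' :: '/' :: t') = segs ('/' :: t') := by simp [segs, mySplit]
          rw [hsegs]
          simp [List.getLast?_cons_cons]
        · rw [dedup_slash_cons, if_neg (by simp [hd])]
          rw [ih]
          have hsegs : segs ('/' :: d :: t') = segs (d :: t') := by simp [segs, mySplit]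
          rw [hsegs]
          simp [List.getLast?_cons_cons, hd]
    · cases t with
      | nil =>
          rw [dedup_cons_ne c [] hc]
          simp [dedup, segs, mySplit, hc, intercalate_singleton]
      | cons d t' =>
        by_cases hd : d = '/'
        · subst hd
          rw [dedup_cons_ne c _ hc, ih]
          have hsplit : mySplit (c :: '/' :: t') = [c] :: mySplit t' := by
            simp [mySplit, hc]
          have hsegs : segs (c :: '/' :: t') = [c] :: segs t' := by
            rw [segs, hsplit]; simp [segs]
          have hsegs' : segs ('/' :: t') = segs t' := by simp [segs, mySplit]
          rw [hsegs, hsegs']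
          cases hst : segs t' with
          | nil =>
              have hall : ∀ x ∈ ('/' :: t' : List Char), x = '/' :=
                all_slash_of_segs_nil _ (by rw [hsegs']; exact hst)
              have hlast : (('/' : Char) :: t').getLast? = some '/' :=
                getLast?_all_slash _ hall (by simp)
              simp [intercalate_singleton, List.getLast?_cons_cons, hlast, hc, List.intercalate]
          | cons s r =>
              rw [intercalate_cons_cons]
              simp [List.getLast?_cons_cons, hc]
        · rw [dedup_cons_ne c _ hc, ih]
          obtain ⟨p', ps', hmt⟩ : ∃ p ps, mySplit t' = p :: ps := by
            cases h : mySplit t' with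
            | nil => exact absurd h (mySplit_ne_nil t')
            | cons p ps => exact ⟨p, ps, rfl⟩
          have hsplit' : mySplit (d :: t') = (d :: p') :: ps' := by
            simp [mySplit, hd, hmt]
          have hsplit'' : mySplit (c :: d :: t') = (c :: d :: p') :: ps' := by
            rw [mySplit, if_neg hc, hsplit']
            rfl
          have hsegs1 : segs (d :: t') = (d :: p') :: (ps'.filter (fun s => !s.isEmpty)) := by
            rw [segs, hsplit']; simp
          have hsegs2 : segs (c :: d :: t') = (c :: d :: p') :: (ps'.filter (fun s => !s.isEmpty)) := by
            rw [segs, hsplit'']; simp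
          rw [hsegs1, hsegs2]
          simp only [List.head?_cons, List.getLast?_cons_cons, intercalate_cons_head]
          simp [hc, hd]

lemma loop_eq_dedup (p : List Char) : ensure_loop p = dedup p := by
  fun_induction ensure_loop with
  | case1 p h ih =>
      rw [ih, replace_eq_myRep, dedup_myRep]
  | case2 p h =>
      exact (dedup_eq_self p ((PySem.Chars.isIn_eq_false_iff _ _).mp (by simpa using h))).symm

lemma segs_prop (l : List Char) : ∀ x ∈ segs l, x ≠ [] ∧ '/' ∉ x := by
  intro x hx
  have h := List.mem_filter.mp hx
  exact ⟨by simpa using h.2, mySplit_slash_free l x h.1⟩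

lemma getLast?_intercalate (r : List (List Char)) (s : List Char)
    (h : ∀ x ∈ s :: r, x ≠ [] ∧ '/' ∉ x) :
    ∃ a, (List.intercalate ['/'] (s :: r)).getLast? = some a ∧ a ≠ '/' := by
  induction r generalizing s with
  | nil =>
      have hs := h s (by simp)
      refine ⟨s.getLast hs.1, ?_, ?_⟩
      · rw [intercalate_singleton, List.getLast?_eq_some_getLast hs.1]
      · intro hEq; exact hs.2 (hEq ▸ List.getLast_mem hs.1)
  | cons y r' ih =>
      obtain ⟨a, ha, hane⟩ := ih y (fun x hx => h x (by simp at hx ⊢; tauto))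
      refine ⟨a, ?_, hane⟩
      rw [intercalate_cons_cons, List.append_assoc,
          List.getLast?_append_of_ne_nil _ (by simp),
          List.getLast?_append_of_ne_nil _ (by rintro hEq; rw [hEq] at ha; simp at ha)]
      exact ha

lemma endswith_slash_iff (l : List Char) :
    PySem.Chars.endswith l ['/'] = true ↔ l.getLast? = some '/' :=
  (PySem.Chars.endswith_iff _ _).trans (singleton_suffix_iff '/' l)

lemma step2_eq (P x : List Char) (hP : P = ['/'] ∨ P = []) (hx : x.head? ≠ some '/')
    (hxne : x ≠ []) :
    (if !(PySem.Chars.startswith (P ++ x) ['/']) then '/' :: (P ++ x) else P ++ x)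
      = '/' :: x := by
  rcases hP with rfl | rfl
  · have h1 : PySem.Chars.startswith (['/'] ++ x) ['/'] = true := by
      simp [PySem.Chars.startswith, List.isPrefixOf]
    rw [h1]; simp
  · cases x with
    | nil => exact absurd rfl hxne
    | cons a t =>
        have ha : a ≠ '/' := fun h => hx (by simp [h])
        have h1 : PySem.Chars.startswith ([] ++ a :: t) ['/'] = false := by
          simp [PySem.Chars.startswith, List.isPrefixOf]
          exact fun hEq => ha hEq.symm
        rw [h1]; simp

lemma getLast?_slash_cons (y : List Char) (hy : y ≠ []) :
    (('/' : Char) :: y).getLast? = y.getLast? := by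
  cases y with
  | nil => exact absurd rfl hy
  | cons b t => exact List.getLast?_cons_cons

lemma step3_strip (y : List Char) :
    (if ('/' :: (y ++ ['/'])) ≠ ['/'] ∧ PySem.Chars.endswith ('/' :: (y ++ ['/'])) ['/']
       then PySem.List.slice ('/' :: (y ++ ['/'])) none (some (-1))
       else '/' :: (y ++ ['/'])) = '/' :: y := by
  rw [show (('/' : Char) :: (y ++ ['/'])) = ('/' :: y) ++ ['/'] from by simp]
  rw [if_pos ⟨by simp, (endswith_slash_iff _).mpr List.getLast?_concat⟩]
  rw [PySem.List.slice_to_neg_one, List.dropLast_concat]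

lemma step3_keep (y : List Char) (b : Char) (hb : y.getLast? = some b) (hbne : b ≠ '/') :
    (if ('/' :: y) ≠ ['/'] ∧ PySem.Chars.endswith ('/' :: y) ['/']
       then PySem.List.slice ('/' :: y) none (some (-1))
       else '/' :: y) = '/' :: y := by
  rw [if_neg]
  rintro ⟨-, hend⟩
  rw [endswith_slash_iff, getLast?_slash_cons y (by rintro rfl; simp at hb), hb] at hend
  exact hbne (by injection hend)

lemma main_eq (cs : List Char) :
    (let p1 := ensure_loop cs
     let p2 := if !(PySem.Chars.startswith p1 ['/']) then '/' :: p1 else p1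
     if p2 ≠ ['/'] ∧ PySem.Chars.endswith p2 ['/'] then PySem.List.slice p2 none (some (-1)) else p2)
    = '/' :: List.intercalate ['/'] (segs cs) := by
  simp only []
  rw [loop_eq_dedup, reconstruct]
  cases hseg : segs cs with
  | nil =>
      by_cases hh : cs.head? = some '/'
      · simp [hseg, hh, List.intercalate, PySem.Chars.startswith, List.isPrefixOf,
              endswith_slash_iff]
      · simp [hseg, hh, List.intercalate, PySem.Chars.startswith, List.isPrefixOf,
              endswith_slash_iff]
  | cons s r =>
      have hprop := segs_prop cs
      rw [hseg] at hprop
      have hs := hprop s (by simp)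
      obtain ⟨a, s'', rfl⟩ : ∃ a s'', s = a :: s'' := by
        cases s with
        | nil => exact absurd rfl hs.1
        | cons a b => exact ⟨a, b, rfl⟩
      have ha : a ≠ '/' := fun h => hs.2 (h ▸ List.mem_cons_self ..)
      obtain ⟨b, hb, hbne⟩ := getLast?_intercalate r (a :: s'') hprop
      obtain ⟨I', hI'⟩ : ∃ I', List.intercalate ['/'] ((a :: s'') :: r) = a :: I' := by
        rw [intercalate_cons_head]; exact ⟨_, rfl⟩
      rw [hI'] at hb
      simp only [hseg, hI', ne_eq, List.cons_ne_nil, not_false_eq_true, and_true]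
      rw [List.append_assoc]
      by_cases hS : cs.getLast? = some '/'
      · simp only [hS, if_pos]
        rw [step2_eq _ _ (by by_cases hh : cs.head? = some '/' <;> simp [hh]) (by simp [ha]) (by simp)]
        exact step3_strip (a :: I')
      · simp only [hS, if_neg, ite_false]
        rw [List.append_nil]
        rw [step2_eq _ _ (by by_cases hh : cs.head? = some '/' <;> simp [hh]) (by simp [ha]) (by simp)]
        exact step3_keep (a :: I') b hb hbne

-- ===== VERDICT (by name: the statement is the Claim_ definition above) =====
theorem ensure_single_slashes_py_spec : Claim_equal_ensure_single_slashes_py := by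
  intro path _
  unfold Spec_ensure_single_slashes_py ensure_single_slashes_py ensure_single_slashes_py_alt
  apply congrArg String.ofList
  rw [splitOn_eq_mySplit]
  exact main_eq (PySem.Chars.replace (PySem.Chars.strip path.toList) ['\\'] ['/'])
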